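-- pv_equiv track=rewrite | github.com/ARRUKlib/ticket | main_api/zammad_auto_agent.py | detect_skill_owner
-- ===== SOURCE A (Python) =====
-- DEFAULT_OWNER_ID = 5
--
-- def detect_skill_owner(text: str) -> int:
--     text = text.lower()
--     if "apple" in text:
--         return 4
--     elif any(word in text for word in ["network", "router", "switch"]):
--         return 15
--     elif "signage" in text or "display" in text:
--         return 16
--     return DEFAULT_OWNER_ID
-- ===== SOURCE B (Python) =====
-- DEFAULT_OWNER_ID = 5
--
-- KEYWORD_OWNER = {
--     "apple": 4,
--     "network": 15,
--     "router": 15,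
--     "switch": 15,
--     "signage": 16,
--     "display": 16,
-- }
--
-- PRIORITY = {4: 0, 15: 1, 16: 2}
--
-- def detect_skill_owner(text: str) -> int:
--     t = text.lower()
--     hits = {owner for word, owner in KEYWORD_OWNER.items() if word in t}
--     return min(hits, key=lambda o: PRIORITY[o]) if hits else DEFAULT_OWNER_ID
-- ===== Notes on version B (the rewrite author's own statement) =====
-- stated objective: alternative
-- what changed: B replaces A's short-circuiting if-elif priority chain with a two-stage algorithm: an exhaustive pass over a flat keyword->owner map collecting the set of all matching owner ids, then selecting the winner as the minimum of that set under a priority ranking.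
import Mathlib
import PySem

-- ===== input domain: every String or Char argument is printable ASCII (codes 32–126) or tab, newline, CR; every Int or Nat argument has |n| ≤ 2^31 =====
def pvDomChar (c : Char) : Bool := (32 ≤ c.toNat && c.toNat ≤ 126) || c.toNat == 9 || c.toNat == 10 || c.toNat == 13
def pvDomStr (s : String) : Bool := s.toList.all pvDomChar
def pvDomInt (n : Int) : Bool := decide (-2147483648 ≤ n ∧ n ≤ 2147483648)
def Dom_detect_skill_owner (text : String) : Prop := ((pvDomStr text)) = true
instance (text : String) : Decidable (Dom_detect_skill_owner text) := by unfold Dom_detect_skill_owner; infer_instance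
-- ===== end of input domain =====

-- B replaces A's short-circuiting if-elif chain with a two-stage algorithm: collect the
-- SET of all matching owner ids from a flat keyword->owner map, then pick the minimum
-- under a priority ranking (objective: alternative); same return value on all inputs.

-- ===== PORT A =====
def detect_skill_owner (text : String) : Int :=
  let t := PySem.Str.lower text
  if PySem.Str.isIn "apple" t then 4
  else if (["network", "router", "switch"].any (fun word => PySem.Str.isIn word t)) then 15
  else if PySem.Str.isIn "signage" t || PySem.Str.isIn "display" t then 16
  else 5

-- ===== PORT B =====
def pvKeywordOwner : List (String × Int) :=
  [("apple", 4), ("network", 15), ("router", 15), ("switch", 15), ("signage", 16), ("display", 16)]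

def pvPriority : PySem.Dict Int Int := PySem.Dict.ofList [(4, 0), (15, 1), (16, 2)]

def detect_skill_owner_alt (text : String) : Int :=
  let t := PySem.Str.lower text
  -- the set comprehension {owner for word, owner in KEYWORD_OWNER.items() if word in t}
  let hits : PySem.Set Int :=
    pvKeywordOwner.foldl
      (fun s p => if PySem.Str.isIn p.1 t then PySem.Set.add s p.2 else s) PySem.Set.empty
  -- min(hits, key=lambda o: PRIORITY[o]) if hits else DEFAULT_OWNER_ID
  -- (PRIORITY[o] ported as getD 0: every element of hits is a key of PRIORITY, so it never raises)
  match PySem.List.min? hits (fun o => PySem.Dict.getD pvPriority o 0) with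
  | some m => m
  | none => 5

-- ===== PRECONDITION & SPEC =====
def Spec_detect_skill_owner (text : String) (out : Int) : Prop := out = detect_skill_owner_alt text
instance (text : String) (out : Int) : Decidable (Spec_detect_skill_owner text out) := by unfold Spec_detect_skill_owner; infer_instance

-- ===== CLAIM (what is proved, stated in full; the proofs are below) =====
def Claim_equal_detect_skill_owner : Prop := ∀ (text : String), Dom_detect_skill_owner text → Spec_detect_skill_owner text (detect_skill_owner text)

-- ===== LEMMAS AND PROOFS =====

-- Both programs are functions of the six membership booleans of the lowercased text;
-- pvA/pvB abstract them and the 64 cases are checked by decide.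
def pvA (a n r s g d : Bool) : Int :=
  if a then 4 else if n || (r || s) then 15 else if g || d then 16 else 5

def pvB (a n r s g d : Bool) : Int :=
  let hits : PySem.Set Int :=
    [(a, (4 : Int)), (n, 15), (r, 15), (s, 15), (g, 16), (d, 16)].foldl
      (fun S p => if p.1 then PySem.Set.add S p.2 else S) PySem.Set.empty
  match PySem.List.min? hits (fun o => PySem.Dict.getD pvPriority o 0) with
  | some m => m
  | none => 5

theorem pvAB_eq : ∀ a n r s g d : Bool, pvA a n r s g d = pvB a n r s g d := by decide

-- ===== VERDICT (by name: the statement is the Claim_ definition above) =====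
theorem detect_skill_owner_spec : Claim_equal_detect_skill_owner := by
  intro text _
  show detect_skill_owner text = detect_skill_owner_alt text
  have hA : detect_skill_owner text =
      pvA (PySem.Str.isIn "apple" (PySem.Str.lower text))
        (PySem.Str.isIn "network" (PySem.Str.lower text))
        (PySem.Str.isIn "router" (PySem.Str.lower text))
        (PySem.Str.isIn "switch" (PySem.Str.lower text))
        (PySem.Str.isIn "signage" (PySem.Str.lower text))
        (PySem.Str.isIn "display" (PySem.Str.lower text)) := by
    simp only [detect_skill_owner, pvA, List.any_cons, List.any_nil, Bool.or_false]
  have hB : detect_skill_owner_alt text =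
      pvB (PySem.Str.isIn "apple" (PySem.Str.lower text))
        (PySem.Str.isIn "network" (PySem.Str.lower text))
        (PySem.Str.isIn "router" (PySem.Str.lower text))
        (PySem.Str.isIn "switch" (PySem.Str.lower text))
        (PySem.Str.isIn "signage" (PySem.Str.lower text))
        (PySem.Str.isIn "display" (PySem.Str.lower text)) := by
    simp only [detect_skill_owner_alt, pvB, pvKeywordOwner, List.foldl]
  rw [hA, hB, pvAB_eq]
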